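-- pv_equiv track=rewrite | github.com/flyshadow-a/shiyou | pages/sacs_export_service.py | append_before_final_end
-- ===== SOURCE A (Python) =====
-- from typing import Dict, List, Optional
--
-- def append_before_final_end(original_lines: List[str], insert_lines: List[str]) -> List[str]:
--     out = list(original_lines)
--     end_idx = None
--     for i in range(len(out) - 1, -1, -1):
--         if out[i].strip().upper() == "END":
--             end_idx = i
--             break
--
--     if end_idx is None:
--         if out and not out[-1].endswith("\n"):
--             out[-1] += "\n"
--         out.extend(insert_lines)
--         return out
--
--     return out[:end_idx] + insert_lines + out[end_idx:]
-- ===== SOURCE B (Python) =====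
-- def append_before_final_end(original_lines, insert_lines):
--     # Single forward pass with accumulators: `pre` holds lines strictly before the
--     # last 'END' seen so far, `suf` holds the lines from that 'END' onward.
--     pre = []
--     suf = []
--     seen = False
--     for line in original_lines:
--         if line.strip().upper() == "END":
--             pre.extend(suf)
--             suf = [line]
--             seen = True
--         elif seen:
--             suf.append(line)
--         else:
--             pre.append(line)
--     if seen:
--         return pre + list(insert_lines) + suf
--     out = pre
--     if out and not out[-1].endswith("\n"):
--         out[-1] += "\n"
--     out.extend(insert_lines)
--     return out
-- ===== Notes on version B (the rewrite author's own statement) =====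
-- stated objective: alternative
-- what changed: Replaced the backward index scan plus list slicing with a single forward pass over the lines maintaining before/after accumulators around the last 'END' line, so no indices or slices are used.
import Mathlib
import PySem

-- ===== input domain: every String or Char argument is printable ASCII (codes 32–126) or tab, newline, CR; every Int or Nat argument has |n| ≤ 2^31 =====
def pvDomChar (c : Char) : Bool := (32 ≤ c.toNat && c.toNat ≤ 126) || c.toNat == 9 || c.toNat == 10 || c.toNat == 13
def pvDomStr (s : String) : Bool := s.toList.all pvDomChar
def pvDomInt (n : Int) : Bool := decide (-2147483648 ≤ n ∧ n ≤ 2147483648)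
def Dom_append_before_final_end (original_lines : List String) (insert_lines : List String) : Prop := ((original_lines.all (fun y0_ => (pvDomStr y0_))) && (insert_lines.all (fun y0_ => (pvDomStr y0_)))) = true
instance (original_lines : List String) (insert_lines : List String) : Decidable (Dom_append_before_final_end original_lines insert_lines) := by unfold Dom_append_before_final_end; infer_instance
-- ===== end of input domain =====

-- B replaces A's backward index scan + slicing by one forward pass with before/after
-- accumulators (objective: alternative; same cost). Return value only (A copies its input).

-- shared helper: line.strip().upper() == "END" (this test appears verbatim in both Pythons)
def pvIsEnd (s : String) : Bool := PySem.Str.upper (PySem.Str.strip s) == "END"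

-- ===== PORT A =====
-- A's backward for-loop with break: first index in the countdown range whose line is 'END'
def pvScanA (out : List String) : List Int → Option Int
  | [] => none
  | i :: rest => if pvIsEnd (PySem.List.pyGetD out i "") then some i else pvScanA out rest

def append_before_final_end (original_lines : List String) (insert_lines : List String) : List String :=
  match pvScanA original_lines (PySem.List.pyRange ((original_lines.length : Int) - 1) (-1) (-1)) with
  | some i => PySem.List.slice original_lines none (some i) ++ insert_lines
      ++ PySem.List.slice original_lines (some i) none
  | none =>
      (if !original_lines.isEmpty
          && !PySem.Str.endswith (PySem.List.pyGetD original_lines (-1) "") "\n"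
       then original_lines.dropLast ++ [PySem.List.pyGetD original_lines (-1) "" ++ "\n"]
       else original_lines) ++ insert_lines

-- ===== PORT B =====
-- one forward step of B's loop over the state (pre, suf, seen)
def pvStepB (st : List String × List String × Bool) (line : String) : List String × List String × Bool :=
  let (pre, suf, seen) := st
  if pvIsEnd line then (pre ++ suf, [line], true)
  else if seen then (pre, suf ++ [line], true)
  else (pre ++ [line], suf, seen)

def append_before_final_end_alt (original_lines : List String) (insert_lines : List String) : List String :=
  match original_lines.foldl pvStepB ([], [], false) with
  | (pre, suf, true) => pre ++ insert_lines ++ suf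
  | (out, _, false) =>
      (if !out.isEmpty && !PySem.Str.endswith (PySem.List.pyGetD out (-1) "") "\n"
       then out.dropLast ++ [PySem.List.pyGetD out (-1) "" ++ "\n"]
       else out) ++ insert_lines

-- ===== PRECONDITION & SPEC =====
def Spec_append_before_final_end (original_lines : List String) (insert_lines : List String) (out : List String) : Prop := out = append_before_final_end_alt original_lines insert_lines
instance (original_lines : List String) (insert_lines : List String) (out : List String) : Decidable (Spec_append_before_final_end original_lines insert_lines out) := by unfold Spec_append_before_final_end; infer_instance

-- ===== CLAIM (what is proved, stated in full; the proofs are below) =====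
def Claim_equal_append_before_final_end : Prop := ∀ (original_lines : List String) (insert_lines : List String), Dom_append_before_final_end original_lines insert_lines → Spec_append_before_final_end original_lines insert_lines (append_before_final_end original_lines insert_lines)

-- ===== LEMMAS AND PROOFS =====

-- index of the LAST 'END' line, computed from the front (the common characterisation)
def pvLastEnd : List String → Option Nat
  | [] => none
  | x :: xs => match pvLastEnd xs with
    | some j => some (j + 1)
    | none => if pvIsEnd x then some 0 else none

lemma pvLastEnd_append (xs : List String) (y : String) :
    pvLastEnd (xs ++ [y]) = if pvIsEnd y then some xs.length else pvLastEnd xs := by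
  induction xs with
  | nil => cases hy : pvIsEnd y <;> simp [pvLastEnd, hy]
  | cons x xs ih =>
      simp only [List.cons_append, pvLastEnd, ih]
      split_ifs <;> rcases h : pvLastEnd xs <;> simp

lemma pvLastEnd_lt (xs : List String) (k : Nat) (h : pvLastEnd xs = some k) : k < xs.length := by
  induction xs generalizing k with
  | nil => simp [pvLastEnd] at h
  | cons x xs ih =>
      simp only [pvLastEnd] at h
      rcases h' : pvLastEnd xs with _ | j <;> rw [h'] at h
      · split_ifs at h
        injection h with h; simp [← h]
      · injection h with h
        have := ih j h'
        simp only [List.length_cons]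
        omega

lemma pvScanA_congr (a b : List String) (l : List Int)
    (h : ∀ i ∈ l, PySem.List.pyGetD a i "" = PySem.List.pyGetD b i "") :
    pvScanA a l = pvScanA b l := by
  induction l with
  | nil => rfl
  | cons i rest ih =>
      simp only [pvScanA, h i (by simp)]
      rw [ih (fun j hj => h j (by simp [hj]))]

lemma pvScanA_spec (out : List String) :
    pvScanA out (PySem.List.pyRange ((out.length : Int) - 1) (-1) (-1)) =
      (match pvLastEnd out with
       | some k => some (k : Int)
       | none => none) := by
  induction out using List.reverseRecOn with
  | nil => simp [PySem.List.pyRange_neg_one_eq_nil, pvScanA, pvLastEnd]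
  | append_singleton xs y ih =>
      have hlen : (((xs ++ [y]).length : Int)) - 1 = (xs.length : Int) := by simp
      rw [hlen, PySem.List.pyRange_neg_one_cons (by omega), pvScanA]
      have hget : PySem.List.pyGetD (xs ++ [y]) (xs.length : Int) "" = y := by
        rw [PySem.List.pyGetD_eq_getElem _ "" (by omega) (by simp)]
        simp
      rw [hget, pvLastEnd_append]
      split_ifs with hy
      · rfl
      · rw [pvScanA_congr (xs ++ [y]) xs _ ?_, ih]
        intro i hi
        rw [PySem.List.mem_pyRange_neg_one] at hi
        rw [PySem.List.pyGetD_eq_getElem _ "" (by omega) (by simp; omega),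
            PySem.List.pyGetD_eq_getElem _ "" (by omega) (by omega)]
        rw [List.getElem_append_left (by omega)]

lemma pvFoldB_spec (xs : List String) :
    xs.foldl pvStepB ([], [], false) =
      match pvLastEnd xs with
      | some k => (xs.take k, xs.drop k, true)
      | none => (xs, [], false) := by
  induction xs using List.reverseRecOn with
  | nil => simp [pvLastEnd]
  | append_singleton xs y ih =>
      rw [List.foldl_append, ih, pvLastEnd_append]
      rcases h : pvLastEnd xs with _ | k <;> split_ifs with hy <;>
        simp only [List.foldl_cons, List.foldl_nil, pvStepB]
      · simp [hy]
      · simp [hy]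
      · simp [hy]
      · have hk := pvLastEnd_lt xs k h
        simp [hy, List.take_append_of_le_length (le_of_lt hk),
          List.drop_append_of_le_length (le_of_lt hk)]

-- ===== VERDICT (by name: the statement is the Claim_ definition above) =====
theorem append_before_final_end_spec : Claim_equal_append_before_final_end := by
  intro ol il _
  unfold Spec_append_before_final_end append_before_final_end append_before_final_end_alt
  rw [pvScanA_spec, pvFoldB_spec]
  rcases h : pvLastEnd ol with _ | k
  · rfl
  · show PySem.List.slice ol none (some (k : Int)) ++ il ++ PySem.List.slice ol (some (k : Int)) none
      = ol.take k ++ il ++ ol.drop k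
    rw [PySem.List.slice_to_natCast, PySem.List.slice_from_natCast]
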